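-- pv_equiv track=rewrite | github.com/robbiedantonio/EC551_PA2 | map_utilities.py | expand_term
-- ===== SOURCE A (Python) =====
-- def expand_term (bstring_term):
--     '''
--     Expands a bstring term with don't cares ('1-0')to a list of terms covered by it (['100', '110'])
--     '''
--     if '-' not in bstring_term:
--         return [bstring_term]
--
--     index = bstring_term.index('-')
--     return (
--         expand_term(bstring_term[:index] + '0' + bstring_term[index + 1:]) +
--         expand_term(bstring_term[:index] + '1' + bstring_term[index + 1:])
--     )
-- ===== SOURCE B (Python) =====
-- def expand_term(bstring_term):
--     '''
--     Expands a bstring term with don't cares ('1-0') to a list of terms covered by it (['100', '110'])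
--     '''
--     terms = ['']
--     for ch in bstring_term:
--         if ch == '-':
--             terms = [t + bit for t in terms for bit in '01']
--         else:
--             terms = [t + ch for t in terms]
--     return terms
-- ===== Notes on version B (the rewrite author's own statement) =====
-- stated objective: idiomatic
-- what changed: Replaced the find-first-dash binary recursion by a single left-to-right fold over the characters that extends a running list of prefixes, branching on each dash.
import Mathlib
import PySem

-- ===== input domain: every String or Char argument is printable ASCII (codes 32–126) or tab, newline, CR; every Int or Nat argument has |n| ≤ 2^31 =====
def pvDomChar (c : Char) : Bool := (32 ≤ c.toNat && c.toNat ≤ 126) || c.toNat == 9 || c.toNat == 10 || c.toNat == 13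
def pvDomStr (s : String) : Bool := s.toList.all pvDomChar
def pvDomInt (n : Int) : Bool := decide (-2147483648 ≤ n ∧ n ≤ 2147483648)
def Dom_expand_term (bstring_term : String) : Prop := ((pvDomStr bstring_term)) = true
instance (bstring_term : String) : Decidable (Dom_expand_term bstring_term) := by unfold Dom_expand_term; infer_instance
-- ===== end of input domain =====

-- B replaces A's find-first-dash binary recursion by a single left-to-right fold over the
-- characters, extending a running list of prefixes (idiomatic; same output, same order).

-- ===== PORT A =====
-- termination helper for the A-side recursion: replacing the first '-' lowers the dash count
theorem pvCountFillLt (l : List Char) (c : Char) (h : '-' ∈ l) (hc : c ≠ '-') :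
    ((l.take (l.idxOf '-') ++ c :: l.drop (l.idxOf '-' + 1)).count '-') < l.count '-' := by
  have hi : l.idxOf '-' < l.length := List.idxOf_lt_length_of_mem h
  have hget : l[l.idxOf '-'] = '-' := List.getElem_idxOf hi
  have hdec : l.drop (l.idxOf '-') = '-' :: l.drop (l.idxOf '-' + 1) := by
    rw [List.drop_eq_getElem_cons hi, hget]
  have hl : l = l.take (l.idxOf '-') ++ '-' :: l.drop (l.idxOf '-' + 1) := by
    conv_lhs => rw [← List.take_append_drop (l.idxOf '-') l, hdec]
  rw [List.count_append, List.count_cons]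
  conv_rhs => rw [hl, List.count_append, List.count_cons]
  simp [hc]

-- worker over the character list; mirrors A's code on String (slices s[:i], s[i+1:] are
-- exact as take/drop here since 0 ≤ i < len, and str.index('-') = idxOf when '-' ∈ l)
def pvExpandA (l : List Char) : List (List Char) :=
  if h : '-' ∉ l then [l]
  else
    let i := l.idxOf '-'
    pvExpandA (l.take i ++ '0' :: l.drop (i + 1)) ++
      pvExpandA (l.take i ++ '1' :: l.drop (i + 1))
termination_by l.count '-'
decreasing_by
  · exact pvCountFillLt l '0' (not_not.mp h) (by decide)
  · exact pvCountFillLt l '1' (not_not.mp h) (by decide)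

def expand_term (bstring_term : String) : List String :=
  (pvExpandA bstring_term.toList).map (fun l => String.ofList l)

-- ===== PORT B =====
-- one step of B's loop body: branch on the character, extend every accumulated prefix
def pvStepB (acc : List (List Char)) (c : Char) : List (List Char) :=
  if c = '-' then acc.flatMap (fun t => [t ++ ['0'], t ++ ['1']])
  else acc.map (fun t => t ++ [c])

def expand_term_alt (bstring_term : String) : List String :=
  (bstring_term.toList.foldl pvStepB [([] : List Char)]).map (fun l => String.ofList l)

-- ===== PRECONDITION & SPEC =====
def Spec_expand_term (bstring_term : String) (out : List String) : Prop := out = expand_term_alt bstring_term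
instance (bstring_term : String) (out : List String) : Decidable (Spec_expand_term bstring_term out) := by unfold Spec_expand_term; infer_instance

-- ===== CLAIM (what is proved, stated in full; the proofs are below) =====
def Claim_equal_expand_term : Prop := ∀ (bstring_term : String), Dom_expand_term bstring_term → Spec_expand_term bstring_term (expand_term bstring_term)

-- ===== LEMMAS AND PROOFS =====
-- common characterisation: expansion by structural recursion on the suffix
def pvSpecE : List Char → List (List Char)
  | [] => [[]]
  | c :: rest =>
    if c = '-' then (pvSpecE rest).map ('0' :: ·) ++ (pvSpecE rest).map ('1' :: ·)
    else (pvSpecE rest).map (c :: ·)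

theorem pvSpecE_append_free (p m : List Char) (hp : '-' ∉ p) :
    pvSpecE (p ++ m) = (pvSpecE m).map (p ++ ·) := by
  induction p with
  | nil => simp
  | cons c p ih =>
    have hc : c ≠ '-' := fun hc => hp (by simp [hc])
    have hp' : '-' ∉ p := fun h => hp (List.mem_cons_of_mem _ h)
    simp [pvSpecE, hc, ih hp', List.map_map, Function.comp]

theorem pvExpandA_eq_specE (l : List Char) : pvExpandA l = pvSpecE l := by
  generalize hn : l.count '-' = n
  induction n using Nat.strong_induction_on generalizing l with
  | _ n ih =>
    by_cases h : '-' ∈ l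
    · have hi : l.idxOf '-' < l.length := List.idxOf_lt_length_of_mem h
      have hget : l[l.idxOf '-'] = '-' := List.getElem_idxOf hi
      have hdec : l.drop (l.idxOf '-') = '-' :: l.drop (l.idxOf '-' + 1) := by
        rw [List.drop_eq_getElem_cons hi, hget]
      have hl : l = l.take (l.idxOf '-') ++ '-' :: l.drop (l.idxOf '-' + 1) := by
        conv_lhs => rw [← List.take_append_drop (l.idxOf '-') l, hdec]
      have hfree : '-' ∉ l.take (l.idxOf '-') := fun hm => by
        have := (List.mem_take_iff_idxOf_lt h).mp hm; omega
      have hc0 : (l.take (l.idxOf '-') ++ '0' :: l.drop (l.idxOf '-' + 1)).count '-' < n := by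
        rw [← hn]; exact pvCountFillLt l '0' h (by decide)
      have hc1 : (l.take (l.idxOf '-') ++ '1' :: l.drop (l.idxOf '-' + 1)).count '-' < n := by
        rw [← hn]; exact pvCountFillLt l '1' h (by decide)
      rw [pvExpandA]
      simp only [h, not_true_eq_false, reduceDIte]
      rw [ih _ hc0 _ rfl, ih _ hc1 _ rfl,
        pvSpecE_append_free _ _ hfree, pvSpecE_append_free _ _ hfree]
      conv_rhs => rw [hl, pvSpecE_append_free _ _ hfree]
      simp [pvSpecE, List.map_map]
    · have hfree : pvSpecE l = [l] := by
        have := pvSpecE_append_free l [] h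
        simpa [pvSpecE] using this
      rw [pvExpandA]; simp [h, hfree]

theorem pvFoldB_eq_specE (l : List Char) (acc : List (List Char)) :
    l.foldl pvStepB acc = acc.flatMap (fun t => (pvSpecE l).map (t ++ ·)) := by
  induction l generalizing acc with
  | nil => simp [pvSpecE]
  | cons c l ih =>
    rw [List.foldl_cons, ih]
    by_cases hc : c = '-'
    · subst hc
      simp [pvStepB, pvSpecE, List.flatMap_assoc, List.map_map, Function.comp_def,
        List.append_assoc]
    · simp [pvStepB, pvSpecE, hc, List.flatMap_map, List.map_map, Function.comp_def,
        List.append_assoc]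

-- ===== VERDICT (by name: the statement is the Claim_ definition above) =====
theorem expand_term_spec : Claim_equal_expand_term := by
  intro s _
  unfold Spec_expand_term expand_term expand_term_alt
  rw [pvExpandA_eq_specE, pvFoldB_eq_specE]
  simp
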